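-- pv_equiv track=rewrite | github.com/MrHamdulay/csc3-capstone | cheaters/algorithms/winnoweralgorithm.py | whitespaced_stripped_with_line_numbers
-- ===== SOURCE A (Python) =====
-- def whitespaced_stripped_with_line_numbers(string):
--     WHITESPACE = ' \n\t'
--     line_number = 0
--     for char in string:
--         if char == '\n':
--             line_number += 1
--         if char in WHITESPACE:
--             continue
--         yield line_number, char
-- ===== SOURCE B (Python) =====
-- def whitespaced_stripped_with_line_numbers(string):
--     for i, line in enumerate(string.split('\n')):
--         for char in line:
--             if char not in ' \t':
--                 yield i, char
-- ===== Notes on version B (the rewrite author's own statement) =====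
-- stated objective: alternative
-- what changed: B splits the string into its lines up front and enumerates them with an inner loop per line, instead of A's flat character scan with a running line-number counter.
import Mathlib
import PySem

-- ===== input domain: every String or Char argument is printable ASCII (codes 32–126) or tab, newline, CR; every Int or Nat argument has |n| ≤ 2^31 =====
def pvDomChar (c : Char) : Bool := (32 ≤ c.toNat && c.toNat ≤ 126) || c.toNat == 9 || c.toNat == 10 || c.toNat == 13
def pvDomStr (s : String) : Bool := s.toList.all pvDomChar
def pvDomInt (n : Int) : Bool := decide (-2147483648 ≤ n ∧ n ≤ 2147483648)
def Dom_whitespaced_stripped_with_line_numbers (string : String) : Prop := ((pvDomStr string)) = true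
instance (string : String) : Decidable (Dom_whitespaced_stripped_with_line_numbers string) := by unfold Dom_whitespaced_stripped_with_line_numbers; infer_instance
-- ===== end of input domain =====

-- B replaces A's running line_number counter over a flat char scan by splitting the string
-- on '\n' up front and enumerating the resulting lines (objective: alternative decomposition).


-- ===== PORT A =====
-- A's generator loop: a running line_number ('\n' bumps it), chars in ' \n\t' are skipped
-- ('continue'), every other char is yielded with the current line_number
def wsslnGoA (ln : Int) : List Char → List (Int × String)
  | [] => []
  | c :: rest =>
    let ln' := if c = '\n' then ln + 1 else ln
    if c = ' ' ∨ c = '\n' ∨ c = '\t' then wsslnGoA ln' rest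
    else (ln', String.ofList [c]) :: wsslnGoA ln' rest

def whitespaced_stripped_with_line_numbers (string : String) : List (Int × String) :=
  wsslnGoA 0 string.toList

-- ===== PORT B =====
-- Source B: for i, line in enumerate(string.split('\n')): for char in line: if char not in ' \t': yield i, char
def whitespaced_stripped_with_line_numbers_alt (string : String) : List (Int × String) :=
  (PySem.List.enumerate (PySem.Chars.splitOn string.toList ['\n']) 0).flatMap
    (fun p => p.2.filterMap
      (fun c => if c = ' ' ∨ c = '\t' then none else some (p.1, String.ofList [c])))

-- ===== PRECONDITION & SPEC =====
def Spec_whitespaced_stripped_with_line_numbers (string : String) (out : List (Int × String)) : Prop := out = whitespaced_stripped_with_line_numbers_alt string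
instance (string : String) (out : List (Int × String)) : Decidable (Spec_whitespaced_stripped_with_line_numbers string out) := by unfold Spec_whitespaced_stripped_with_line_numbers; infer_instance

-- ===== CLAIM (what is proved, stated in full; the proofs are below) =====
def Claim_equal_whitespaced_stripped_with_line_numbers : Prop := ∀ (string : String), Dom_whitespaced_stripped_with_line_numbers string → Spec_whitespaced_stripped_with_line_numbers string (whitespaced_stripped_with_line_numbers string)

-- ===== LEMMAS AND PROOFS =====

-- proof-side helper: the structural form of splitting a char list on '\n'
def wsslnMsp (cur : List Char) : List Char → List (List Char)
  | [] => [cur]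
  | c :: rest => if c = '\n' then cur :: wsslnMsp [] rest else wsslnMsp (cur ++ [c]) rest

theorem wsslnGo_spec (fuel : Nat) (l cur : List Char) (accs : List (List Char))
    (h : l.length ≤ fuel) :
    PySem.Chars.splitOn.go ['\n'] fuel l cur accs = accs.reverse ++ wsslnMsp cur.reverse l := by
  induction fuel generalizing l cur accs with
  | zero =>
    have : l = [] := by simpa using List.eq_nil_of_length_eq_zero (Nat.le_zero.mp h)
    subst this
    simp [PySem.Chars.splitOn.go, wsslnMsp]
  | succ n ih =>
    cases l with
    | nil => simp [PySem.Chars.splitOn.go, wsslnMsp]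
    | cons c rest =>
      by_cases hc : c = '\n'
      · subst hc
        have hpre : List.isPrefixOf ['\n'] ('\n' :: rest) = true := by
          simp [List.isPrefixOf]
        rw [PySem.Chars.splitOn.go]
        simp only [hpre, if_pos, List.length_cons, List.drop_succ_cons, List.drop_zero,
          List.length_nil]
        rw [ih rest [] (cur.reverse :: accs) (by simpa using Nat.le_of_succ_le_succ h)]
        simp [wsslnMsp]
      · have hpre : List.isPrefixOf ['\n'] (c :: rest) = false := by
          simp only [List.isPrefixOf, Bool.and_true, beq_eq_false_iff_ne, ne_eq]
          exact fun h' => hc h'.symm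
        rw [PySem.Chars.splitOn.go]
        simp only [hpre, Bool.false_eq_true, if_false]
        rw [ih rest (c :: cur) accs (by simpa using Nat.le_of_succ_le_succ h)]
        simp [wsslnMsp, hc]

theorem wsslnSplitOn_eq (l : List Char) :
    PySem.Chars.splitOn l ['\n'] = wsslnMsp [] l := by
  rw [PySem.Chars.splitOn, wsslnGo_spec (l.length + 1) l [] [] (Nat.le_succ _)]
  simp

theorem wssln_main (l cur : List Char) (ln : Int) :
    (PySem.List.enumerate (wsslnMsp cur l) ln).flatMap
      (fun p => p.2.filterMap
        (fun c => if c = ' ' ∨ c = '\t' then none else some (p.1, String.ofList [c])))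
    = cur.filterMap (fun c => if c = ' ' ∨ c = '\t' then none else some (ln, String.ofList [c]))
      ++ wsslnGoA ln l := by
  induction l generalizing cur ln with
  | nil => simp [wsslnMsp, wsslnGoA, PySem.List.enumerate_cons, PySem.List.enumerate_nil]
  | cons c rest ih =>
    by_cases hc : c = '\n'
    · subst hc
      simp only [wsslnMsp, if_true, PySem.List.enumerate_cons, List.flatMap_cons]
      rw [ih [] (ln + 1)]
      simp [wsslnGoA]
    · simp only [wsslnMsp, hc, if_false]
      rw [ih (cur ++ [c]) ln]
      by_cases hw : c = ' ' ∨ c = '\t'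
      · simp [wsslnGoA, List.filterMap_append, hw, hc]
      · simp [wsslnGoA, List.filterMap_append, hw, hc]

-- ===== VERDICT (by name: the statement is the Claim_ definition above) =====
theorem whitespaced_stripped_with_line_numbers_spec : Claim_equal_whitespaced_stripped_with_line_numbers := by
  intro s _
  unfold Spec_whitespaced_stripped_with_line_numbers
  unfold whitespaced_stripped_with_line_numbers whitespaced_stripped_with_line_numbers_alt
  rw [wsslnSplitOn_eq, wssln_main]
  simp
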